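-- pv_equiv track=rewrite | github.com/AliBinary/Quera-Answers | problemset/15124.py | count_dreams
-- ===== SOURCE A (Python) =====
-- def count_dreams(a, b, x):
--     count = 0
--     for i in range(1, x+1):
--         if a % i == 0:
--             for j in range(1, x+1-i):
--                 if b % j == 0:
--                     count += 1
--     return count
-- ===== SOURCE B (Python) =====
-- def count_dreams(a, b, x):
--     # One fused pass: walk m = 1..x-1 keeping c = #{j <= m : b % j == 0};
--     # the pair (i, j) counting of A is reindexed as i = x - m, contributing c when i divides a.
--     total = 0
--     c = 0
--     for m in range(1, x):
--         if b % m == 0: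
--             c += 1
--         if a % (x - m) == 0:
--             total += c
--     return total
-- ===== Notes on version B (the rewrite author's own statement) =====
-- stated objective: faster
-- what changed: Replaced A's nested loops (for each divisor i of a, rescanning 1..x-i for divisors of b) by a single fused pass over m=1..x-1 that maintains a running count of b's divisors up to m and adds it whenever x-m divides a.
import Mathlib
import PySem

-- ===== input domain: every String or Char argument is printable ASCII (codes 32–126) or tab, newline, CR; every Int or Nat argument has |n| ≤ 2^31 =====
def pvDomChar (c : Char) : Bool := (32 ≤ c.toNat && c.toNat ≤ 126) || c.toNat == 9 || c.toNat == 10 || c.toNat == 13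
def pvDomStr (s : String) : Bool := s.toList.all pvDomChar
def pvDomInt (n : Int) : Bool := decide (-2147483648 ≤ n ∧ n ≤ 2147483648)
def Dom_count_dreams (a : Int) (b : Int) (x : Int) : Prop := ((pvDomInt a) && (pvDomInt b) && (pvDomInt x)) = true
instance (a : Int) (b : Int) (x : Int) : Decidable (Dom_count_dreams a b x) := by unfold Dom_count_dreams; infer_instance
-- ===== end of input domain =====

-- B replaces A's nested divisor loops by one fused pass keeping a running count of b's divisors (objective: faster).

-- ===== PORT A =====
def count_dreams (a : Int) (b : Int) (x : Int) : Int :=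
  (PySem.List.pyRange 1 (x + 1) 1).foldl
    (fun count i =>
      if PySem.Int.mod a i = 0 then
        (PySem.List.pyRange 1 (x + 1 - i) 1).foldl
          (fun c j => if PySem.Int.mod b j = 0 then c + 1 else c) count
      else count) 0

-- ===== PORT B =====
def count_dreams_alt (a : Int) (b : Int) (x : Int) : Int :=
  ((PySem.List.pyRange 1 x 1).foldl
    (fun (st : Int × Int) m =>
      let c := if PySem.Int.mod b m = 0 then st.2 + 1 else st.2
      let total := if PySem.Int.mod a (x - m) = 0 then st.1 + c else st.1
      (total, c)) (0, 0)).1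

-- ===== PRECONDITION & SPEC =====
def Spec_count_dreams (a : Int) (b : Int) (x : Int) (out : Int) : Prop := out = count_dreams_alt a b x
instance (a : Int) (b : Int) (x : Int) (out : Int) : Decidable (Spec_count_dreams a b x out) := by unfold Spec_count_dreams; infer_instance

-- ===== CLAIM (what is proved, stated in full; the proofs are below) =====
def Claim_equal_count_dreams : Prop := ∀ (a : Int) (b : Int) (x : Int), Dom_count_dreams a b x → Spec_count_dreams a b x (count_dreams a b x)

-- ===== LEMMAS AND PROOFS =====

-- number of j in 1..m with b % j == 0 (the value of A's inner loop and of B's running counter c)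
def gdiv (b m : Int) : Int :=
  ((PySem.List.pyRange 1 (m + 1) 1).map
    (fun j => if PySem.Int.mod b j = 0 then (1 : Int) else 0)).sum

theorem gdiv_nonpos (b m : Int) (h : m ≤ 0) : gdiv b m = 0 := by
  unfold gdiv
  rw [PySem.List.pyRange_one_eq_nil (by omega)]
  rfl

theorem gdiv_succ (b m : Int) (h : 1 ≤ m) :
    gdiv b m = gdiv b (m - 1) + (if PySem.Int.mod b m = 0 then (1 : Int) else 0) := by
  unfold gdiv
  have : m + 1 = (m - 1 + 1) + 1 := by ring
  rw [this, PySem.List.pyRange_one_succ_right (by omega)]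
  simp

-- A's inner loop computes gdiv
theorem inner_eq (b t init : Int) :
    (PySem.List.pyRange 1 t 1).foldl
      (fun c j => if PySem.Int.mod b j = 0 then c + 1 else c) init
    = init + gdiv b (t - 1) := by
  unfold gdiv
  have hc : (PySem.List.pyRange 1 t 1).foldl
      (fun c j => if PySem.Int.mod b j = 0 then c + 1 else c) init
      = (PySem.List.pyRange 1 t 1).foldl
      (fun c j => c + (if PySem.Int.mod b j = 0 then (1 : Int) else 0)) init := by
    apply PySem.List.foldl_congr_mem
    intro acc j _
    split_ifs <;> omega
  rw [hc, PySem.List.foldl_add]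
  have : t - 1 + 1 = t := by ring
  rw [this]

-- A as a sum over its outer range
theorem a_as_sum (a b x : Int) :
    count_dreams a b x
      = ((PySem.List.pyRange 1 (x + 1) 1).map
          (fun i => if PySem.Int.mod a i = 0 then gdiv b (x - i) else 0)).sum := by
  unfold count_dreams
  have hc : ∀ (init : Int),
      (PySem.List.pyRange 1 (x + 1) 1).foldl
        (fun count i =>
          if PySem.Int.mod a i = 0 then
            (PySem.List.pyRange 1 (x + 1 - i) 1).foldl
              (fun c j => if PySem.Int.mod b j = 0 then c + 1 else c) count
          else count) init
      = (PySem.List.pyRange 1 (x + 1) 1).foldl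
        (fun count i => count + (if PySem.Int.mod a i = 0 then gdiv b (x - i) else 0)) init := by
    intro init
    apply PySem.List.foldl_congr_mem
    intro acc i _
    split_ifs with h
    · rw [inner_eq]
      have : x + 1 - i - 1 = x - i := by ring
      rw [this]
    · omega
  rw [hc, PySem.List.foldl_add]
  omega

-- B's loop invariant: running counter c = gdiv b (s - 1) entering step m = s
theorem b_loop (a b x : Int) : ∀ (n : Nat) (s tot : Int), (x - s).toNat = n → 1 ≤ s →
    ((PySem.List.pyRange s x 1).foldl
      (fun (st : Int × Int) m =>
        let c := if PySem.Int.mod b m = 0 then st.2 + 1 else st.2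
        let total := if PySem.Int.mod a (x - m) = 0 then st.1 + c else st.1
        (total, c)) (tot, gdiv b (s - 1))).1
    = tot + ((PySem.List.pyRange s x 1).map
        (fun m => if PySem.Int.mod a (x - m) = 0 then gdiv b m else 0)).sum := by
  intro n
  induction n with
  | zero =>
    intro s tot hn _
    rw [PySem.List.pyRange_one_eq_nil (by omega)]
    simp
  | succ k ih =>
    intro s tot hn hs
    rw [PySem.List.pyRange_one_cons (by omega)]
    simp only [List.foldl_cons, List.map_cons, List.sum_cons]
    have hcs : (if PySem.Int.mod b s = 0 then gdiv b (s - 1) + 1 else gdiv b (s - 1))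
        = gdiv b s := by
      rw [gdiv_succ b s hs]
      split_ifs <;> omega
    rw [hcs]
    have hss : s + 1 - 1 = s := by ring
    have hih := ih (s + 1) (if PySem.Int.mod a (x - s) = 0 then tot + gdiv b s else tot)
      (by omega) (by omega)
    rw [hss] at hih
    rw [hih]
    split_ifs <;> omega

-- reversal of a sum: summing F (c - m) over a range equals summing F over the mirrored range
theorem sum_reflect (F : Int → Int) (c : Int) : ∀ (n : Nat) (a b : Int), (b - a).toNat = n →
    ((PySem.List.pyRange a b 1).map (fun m => F (c - m))).sum
    = ((PySem.List.pyRange (c - b + 1) (c - a + 1) 1).map F).sum := by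
  intro n
  induction n with
  | zero =>
    intro a b hn
    rw [PySem.List.pyRange_one_eq_nil (by omega), PySem.List.pyRange_one_eq_nil (by omega)]
    rfl
  | succ k ih =>
    intro a b hn
    rw [PySem.List.pyRange_one_cons (by omega)]
    have hright : PySem.List.pyRange (c - b + 1) (c - a + 1) 1
        = PySem.List.pyRange (c - b + 1) (c - a) 1 ++ [c - a] := by
      have : c - a + 1 = (c - a) + 1 := by ring
      rw [this, PySem.List.pyRange_one_succ_right (by omega)]
    rw [hright]
    simp only [List.map_cons, List.sum_cons, List.map_append, List.sum_append,
      List.map_cons, List.map_nil, List.sum_cons, List.sum_nil]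
    have hih := ih (a + 1) b (by omega)
    have : c - (a + 1) + 1 = c - a := by ring
    rw [this] at hih
    rw [hih]
    ring

-- ===== VERDICT (by name: the statement is the Claim_ definition above) =====
theorem count_dreams_spec : Claim_equal_count_dreams := by
  intro a b x _
  unfold Spec_count_dreams
  rw [a_as_sum]
  unfold count_dreams_alt
  by_cases hx : x ≤ 0
  · rw [PySem.List.pyRange_one_eq_nil (by omega), PySem.List.pyRange_one_eq_nil (by omega)]
    rfl
  · push Not at hx
    have h0 : gdiv b 0 = 0 := gdiv_nonpos b 0 le_rfl
    have hb0 := b_loop a b x (x - 1).toNat 1 0 (by omega) le_rfl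
    norm_num at hb0
    rw [h0] at hb0
    rw [hb0]
    -- A's sum: split off the last term i = x, whose inner count is gdiv b 0 = 0
    rw [PySem.List.pyRange_one_succ_right (by omega)]
    simp only [List.map_append, List.sum_append, List.map_cons, List.map_nil,
      List.sum_cons, List.sum_nil]
    have hsx : (if PySem.Int.mod a x = 0 then gdiv b (x - x) else 0) = 0 := by
      have : x - x = 0 := by ring
      rw [this, h0]
      split_ifs <;> rfl
    rw [hsx]
    have hrefl := sum_reflect (fun i => if PySem.Int.mod a i = 0 then gdiv b (x - i) else 0)
      x (x - 1).toNat 1 x (by omega)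
    have h1 : x - x + 1 = 1 := by ring
    have h2 : x - 1 + 1 = x := by ring
    rw [h1, h2] at hrefl
    simp only [] at hrefl
    rw [← hrefl]
    have : ((PySem.List.pyRange 1 x 1).map
        (fun m => if PySem.Int.mod a (x - m) = 0 then gdiv b m else 0))
        = ((PySem.List.pyRange 1 x 1).map
        (fun m => if PySem.Int.mod a (x - m) = 0 then gdiv b (x - (x - m)) else 0)) := by
      apply List.map_congr_left
      intro m hm
      have hmm : x - (x - m) = m := by ring
      rw [hmm]
    rw [this]
    omega
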